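-- pv_equiv track=rewrite | github.com/alex-valeev/aoc-2023 | d14/main.py | part1
-- ===== SOURCE A (Python) =====
-- from typing import List
--
-- def move_rock(line: List[str]) -> List[str]:
--     line_size = len(line)
--     for i in range(line_size - 1, -1, -1):
--         if line[i] == 'O':
--             for j in range(i + 1, line_size):
--                 if line[j] != '.':
--                     line[i], line[j - 1] = line[j - 1], line[i]
--                     break
--                 if j == line_size - 1:
--                     line[i], line[j] = line[j], line[i]
--
--     for el in line:
--         yield el
--
-- def part1(data: List) -> int:
--     width, height = len(data[0]), len(data)
--
--     for x in range(width):
--         j = height - 1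
--         for el in move_rock([data[y][x] for y in range(height)][::-1]):
--             data[j][x] = el
--             j -= 1
--
--     total = 0
--     for i in range(height):
--         total += data[i].count('O') * (height - i)
--
--     return total
-- ===== SOURCE B (Python) =====
-- # Tilt north with one linear pass per column: track the next free slot and add
-- # each rock's load directly, without moving anything.
-- # (A mutates `data` in place; B does not - equal return values, not side effects.)
-- def part1(data):
--     height = len(data)
--     total = 0
--     for x in range(len(data[0])):
--         free = 0
--         for y in range(height):
--             c = data[y][x]
--             if c == 'O':
--                 total += height - free
--                 free += 1
--             elif c != '.':
--                 free = y + 1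
--     return total
-- ===== Notes on version B (the rewrite author's own statement) =====
-- stated objective: faster
-- what changed: Instead of physically bubbling each rock north with a nested scan over a reversed copy of every column and then re-counting the mutated grid, B makes one linear pass per column tracking the next free slot and adds each rock's load directly, without mutating data.
-- intended difference: On ragged grids where some row extends past the first row's width and carries an 'O' there, A adds those out-of-grid rocks (which its tilt never touches) to the load, while B uses the grid of width len(data[0]) and ignores cells beyond it, which is the intended load of the tilted grid. — e.g. on part1([["O", "."], [".", "#", "O"]]): A returns 3, B returns 2
import Mathlib
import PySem

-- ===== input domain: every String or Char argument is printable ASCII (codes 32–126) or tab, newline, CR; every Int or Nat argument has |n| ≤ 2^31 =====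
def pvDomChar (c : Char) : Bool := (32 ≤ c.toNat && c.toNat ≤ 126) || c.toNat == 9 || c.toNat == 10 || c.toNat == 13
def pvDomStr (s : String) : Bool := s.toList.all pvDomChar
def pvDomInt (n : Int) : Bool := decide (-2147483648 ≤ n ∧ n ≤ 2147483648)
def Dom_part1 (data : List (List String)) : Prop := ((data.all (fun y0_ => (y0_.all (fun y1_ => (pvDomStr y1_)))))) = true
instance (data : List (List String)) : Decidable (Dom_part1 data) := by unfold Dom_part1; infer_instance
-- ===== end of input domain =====

-- B replaces A's in-place rock bubbling (a nested scan per rock over a reversed copy of each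
-- column, then a re-count of the mutated grid) by one linear pass per column with a
-- next-free-slot pointer that adds each rock's load directly; A mutates `data` in place,
-- B does not — the equivalence proved here is about the return value only.

-- ===== PORT A =====
-- Python simultaneous swap `line[i], line[j] = line[j], line[i]`
def pswap (l : List String) (i j : Nat) : List String :=
  (l.set i (l.getD j "")).set j (l.getD i "")

-- inner `for j in range(i+1, line_size)` loop of move_rock, with its break;
-- the loop runs at most n - j steps, encoded as structural recursion on that fuel
def innerLoopF : Nat → List String → Nat → Nat → Nat → List String
  | 0, l, _, _, _ => l
  | f + 1, l, i, n, j =>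
      if j < n then
        if ¬ (l.getD j "" == ".") then pswap l i (j - 1)
        else if j == n - 1 then innerLoopF f (pswap l i j) i n (j + 1)
        else innerLoopF f l i n (j + 1)
      else l

def innerLoop (l : List String) (i n j : Nat) : List String := innerLoopF (n - j) l i n j

-- move_rock: `for i in range(line_size - 1, -1, -1)`; range(n-1,-1,-1) = (List.range n).reverse
def moveRock (line : List String) : List String :=
  let n := line.length
  ((List.range n).reverse).foldl
    (fun l i => if l.getD i "" == "O" then innerLoop l i n (i + 1) else l) line

def part1 (data : List (List String)) : Int :=
  let h := data.length
  let w := (data.headD []).length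
  -- for x in range(width): tilt column x of `data` in place
  let tilted := (List.range w).foldl (fun d x =>
      let col := ((List.range h).map (fun y => (d.getD y []).getD x "")).reverse
      let moved := moveRock col
      -- `j = height - 1; for el in move_rock(...): data[j][x] = el; j -= 1`
      (moved.foldl (fun (st : List (List String) × Nat) el =>
          (st.1.set st.2 ((st.1.getD st.2 []).set x el), st.2 - 1)) (d, h - 1)).1) data
  (List.range h).foldl
    (fun (tot : Int) i => tot + ((tilted.getD i []).count "O") * ((h : Int) - (i : Int))) 0

-- ===== PORT B =====
def part1_alt (data : List (List String)) : Int :=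
  let h := data.length
  (List.range (data.headD []).length).foldl (fun (total : Int) x =>
    ((List.range h).foldl (fun (st : Int × Int) y =>
        let c := (data.getD y []).getD x ""
        if c == "O" then (st.1 + 1, st.2 + ((h : Int) - st.1))
        else if c == "." then st
        else ((y : Int) + 1, st.2)) ((0 : Int), total)).2) 0

-- ===== PRECONDITION & SPEC =====
-- Pre_ excludes inputs where A raises: the empty grid (len(data[0]) IndexError) and grids
-- where some row is shorter than the first row (data[y][x] IndexError during the tilt).
def Pre_part1 (data : List (List String)) : Prop :=
  data ≠ [] ∧ ∀ row ∈ data, (data.headD []).length ≤ row.length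
instance (data : List (List String)) : Decidable (Pre_part1 data) := by
  unfold Pre_part1; infer_instance

def pvWitness_part1 : List (List String) := [["O", "."], [".", "#"]]

-- On ragged grids where some row extends past the first row's width and carries an "O"
-- there, A adds those out-of-grid rocks (which its tilt never touches) to the load, while
-- B uses the grid of width len(data[0]) and ignores cells beyond it, which is the intended
-- load of the tilted grid.
def D_part1 (data : List (List String)) : Prop :=
  ∃ row ∈ data, "O" ∈ row.drop (data.headD []).length
instance (data : List (List String)) : Decidable (D_part1 data) := by
  unfold D_part1; infer_instance

def Spec_part1 (data : List (List String)) (out : Int) : Prop :=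
  ¬ D_part1 data → out = part1_alt data
instance (data : List (List String)) (out : Int) : Decidable (Spec_part1 data out) := by
  unfold Spec_part1; infer_instance

def pvDiffWitness_part1 : List (List String) := [["O", "."], [".", "#", "O"]]
def pvDiffWitnessOut_part1 : Int × Int := (3, 2)

-- ===== CLAIM (what is proved, stated in full; the proofs are below) =====
def Claim_unchanged_part1 : Prop :=
  ∀ (data : List (List String)), Dom_part1 data → Pre_part1 data → Spec_part1 data (part1 data)
def Claim_changed_part1 : Prop :=
  Dom_part1 (pvDiffWitness_part1) ∧ Pre_part1 (pvDiffWitness_part1) ∧ D_part1 (pvDiffWitness_part1) ∧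
  part1 (pvDiffWitness_part1) = pvDiffWitnessOut_part1.1 ∧
  part1_alt (pvDiffWitness_part1) = pvDiffWitnessOut_part1.2 ∧
  pvDiffWitnessOut_part1.1 ≠ pvDiffWitnessOut_part1.2
def Claim_exact_part1 : Prop :=
  ∀ (data : List (List String)), Dom_part1 data → Pre_part1 data → D_part1 data →
    part1 data ≠ part1_alt data

-- ===== LEMMAS AND PROOFS =====

-- leading-dot count, one-rock bubble step, the settled line, and B's column scan
def dcount (l : List String) : Nat := (l.takeWhile (fun s => s == ".")).length

def bub : List String → List String
  | [] => []
  | a :: t => if a == "O" then List.replicate (dcount t) "." ++ "O" :: t.drop (dcount t) else a :: t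

-- weighted load of a line, south end first (index k has weight k+1)
def W : List String → Int
  | [] => 0
  | a :: t => (if a == "O" then 1 else 0) + W t + (t.count "O" : Int)

def bcol (h : Nat) : List String → Nat → Int × Int → Int × Int
  | [], _, st => st
  | c :: t, y, st =>
      bcol h t (y + 1)
        (if c == "O" then (st.1 + 1, st.2 + ((h : Int) - st.1))
         else if c == "." then st else ((y : Int) + 1, st.2))

-- column x of the grid, north end first
def colN (d : List (List String)) (h x : Nat) : List String :=
  (List.range h).map (fun y => (d.getD y []).getD x "")

-- the settled column produced by folding the bubble step (south end first)
def settleF (c : List String) : List String :=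
  c.foldl (fun ac a => bub (a :: ac)) []

theorem innerLoopF_length (f : Nat) : ∀ (l : List String) (i n j : Nat),
    (innerLoopF f l i n j).length = l.length := by
  induction f with
  | zero => intro l i n j; rfl
  | succ f ih =>
    intro l i n j
    simp only [innerLoopF]
    split_ifs <;> simp [pswap, ih]

theorem innerLoop_length (l : List String) (i n j : Nat) :
    (innerLoop l i n j).length = l.length := innerLoopF_length (n - j) l i n j

theorem innerLoop_eq (l : List String) (i n j : Nat) :
    innerLoop l i n j =
      if j < n then
        if ¬ (l.getD j "" == ".") then pswap l i (j - 1)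
        else if j == n - 1 then innerLoop (pswap l i j) i n (j + 1)
        else innerLoop l i n (j + 1)
      else l := by
  unfold innerLoop
  by_cases hj : j < n
  · have he : n - j = (n - (j + 1)) + 1 := by omega
    rw [he]
    simp only [innerLoopF, hj, if_true]
  · have he : n - j = 0 := by omega
    rw [he, if_neg hj]
    rfl

theorem dcount_cons (a : String) (t : List String) :
    dcount (a :: t) = if a == "." then dcount t + 1 else 0 := by
  by_cases h : a == "." <;> simp [dcount, List.takeWhile, h]

theorem dcount_le (l : List String) : dcount l ≤ l.length := by
  induction l with
  | nil => simp [dcount]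
  | cons a t ih => rw [dcount_cons]; split <;> simp <;> omega

theorem innerLoop_spec {n : Nat} (k : Nat) : ∀ (l : List String) (i j : Nat), n = l.length → i < j →
    k = n - j →
    innerLoop l i n j =
      if j + dcount (l.drop j) < n then pswap l i (j + dcount (l.drop j) - 1)
      else if j < n then pswap l i (n - 1) else l := by
  induction k with
  | zero =>
    intro l i j hn hij hk
    have hj : ¬ j < n := by omega
    rw [innerLoop_eq]
    rw [if_neg hj]
    have : l.drop j = [] := by
      apply List.drop_eq_nil_of_le; omega
    rw [this]
    simp [dcount, hj]
  | succ k ih =>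
    intro l i j hn hij hk
    have hj : j < n := by omega
    have hdropc : l.drop j = l.getD j "" :: l.drop (j + 1) := by
      rw [List.getD_eq_getElem l "" (by omega), List.drop_eq_getElem_cons]
    rw [innerLoop_eq]
    rw [if_pos hj]
    by_cases hdot : l.getD j "" == "."
    · simp only [hdot, not_true_eq_false, if_false]
      have hd : dcount (l.drop j) = dcount (l.drop (j+1)) + 1 := by
        rw [hdropc, dcount_cons, if_pos hdot]
      by_cases hlast : j = n - 1
      · -- j = n-1 : swap then the recursive call returns immediately (j+1 = n)
        have : (j == n - 1) = true := by simp [hlast]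
        rw [if_pos (by simpa using this)]
        rw [innerLoop_eq]
        have : ¬ (j + 1 < n) := by omega
        rw [if_neg this]
        have hde : l.drop (j+1) = [] := by apply List.drop_eq_nil_of_le; omega
        have h2 : ¬ (j + dcount (l.drop j) < n) := by rw [hd, hde]; simp [dcount]; omega
        rw [if_neg h2, if_pos hj, hlast]
      · rw [if_neg (by simpa using hlast)]
        rw [ih l i (j+1) hn (by omega) (by omega)]
        rw [hd]
        have e1 : j + (dcount (l.drop (j+1)) + 1) = j + 1 + dcount (l.drop (j+1)) := by omega
        rw [e1]
        split
        · rfl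
        · have hjn : j + 1 < n := by omega
          simp [hjn, hj]
    · simp only [hdot, not_false_eq_true, if_true]
      have hd : dcount (l.drop j) = 0 := by
        rw [hdropc, dcount_cons, if_neg (by simpa using hdot)]
      rw [hd]
      simp [hj]

theorem dcount_take (t : List String) : t.take (dcount t) = List.replicate (dcount t) "." := by
  induction t with
  | nil => simp [dcount]
  | cons a t ih =>
    rw [dcount_cons]
    by_cases h : a == "."
    · simp only [h, if_true]
      rw [List.take_succ_cons, ih, List.replicate_succ]
      simp only [List.cons.injEq, and_true]
      exact eq_of_beq h
    · simp [h]

theorem replicate_set (e : Nat) :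
    (List.replicate (e + 1) ("." : String)).set e "O" = List.replicate e "." ++ ["O"] := by
  induction e with
  | zero => rfl
  | succ e ih =>
    rw [List.replicate_succ (n := e + 1), List.set_cons_succ, ih, List.replicate_succ]
    rfl

theorem pswap_bub (t : List String) :
    pswap ("O" :: t) 0 (dcount t) = bub ("O" :: t) := by
  have hb : bub ("O" :: t) = List.replicate (dcount t) "." ++ "O" :: t.drop (dcount t) := by
    simp [bub]
  cases hd : dcount t with
  | zero => rw [hb, hd]; simp [pswap]
  | succ e =>
    have hle : e + 1 ≤ t.length := by have := dcount_le t; omega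
    have htt : t = List.replicate (e + 1) "." ++ t.drop (e + 1) := by
      conv_lhs => rw [← List.take_append_drop (e + 1) t]
      rw [← hd, dcount_take, hd]
    rw [hb, hd]
    conv_lhs => rw [htt]
    rw [pswap]
    have hget : (("O" :: (List.replicate (e + 1) "." ++ t.drop (e + 1))).getD (e + 1) "") = "." := by
      rw [List.getD_cons_succ]
      rw [List.getD_eq_getElem _ _ (by simp; omega)]
      rw [List.getElem_append_left (by simp)]
      simp
    rw [hget]
    simp only [List.getD_cons_zero, List.set_cons_zero, List.set_cons_succ]
    rw [List.set_append_left _ _ (by simp), replicate_set]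
    rw [List.replicate_succ]
    simp

theorem innerLoop_bub (t : List String) :
    innerLoop ("O" :: t) 0 (t.length + 1) 1 = bub ("O" :: t) := by
  rw [innerLoop_spec (n := t.length + 1) (t.length + 1 - 1) ("O" :: t) 0 1 (by simp) (by omega) rfl]
  have hdrop : ("O" :: t).drop 1 = t := rfl
  rw [hdrop]
  have hle := dcount_le t
  by_cases hlt : 1 + dcount t < t.length + 1
  · rw [if_pos hlt]
    have : 1 + dcount t - 1 = dcount t := by omega
    rw [this, pswap_bub]
  · rw [if_neg hlt]
    have hdt : dcount t = t.length := by omega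
    cases t with
    | nil => simp [bub, dcount]
    | cons b t' =>
      rw [if_pos (by simp)]
      have : (b :: t').length + 1 - 1 = dcount (b :: t') := by simp [hdt]
      rw [this, pswap_bub]

def settle : List String → List String
  | [] => []
  | a :: t => bub (a :: settle t)

def mrStep (n : Nat) : List String → Nat → List String :=
  fun l i => if l.getD i "" == "O" then innerLoop l i n (i + 1) else l

theorem pswap_cons (a : String) (l : List String) (i k : Nat) :
    pswap (a :: l) (i + 1) (k + 1) = a :: pswap l i k := by
  simp [pswap]

theorem innerLoop_shift (fuel : Nat) : ∀ (n j : Nat) (l : List String) (a : String) (i : Nat),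
    i < j → fuel = n - j →
    innerLoop (a :: l) (i + 1) (n + 1) (j + 1) = a :: innerLoop l i n j := by
  induction fuel with
  | zero =>
    intro n j l a i hij hf
    have h1 : ¬ (j + 1 < n + 1) := by omega
    have h2 : ¬ (j < n) := by omega
    conv_lhs => rw [innerLoop_eq]
    conv_rhs => rw [innerLoop_eq]
    rw [if_neg h1, if_neg h2]
  | succ fuel ih =>
    intro n j l a i hij hf
    have h1 : j + 1 < n + 1 := by omega
    have h2 : j < n := by omega
    conv_lhs => rw [innerLoop_eq]
    conv_rhs => rw [innerLoop_eq]
    rw [if_pos h1, if_pos h2]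
    rw [List.getD_cons_succ]
    by_cases hdot : (l.getD j "" == ".")
    · simp only [hdot, not_true_eq_false, if_false]
      have hiff : ((j + 1 : Nat) == (n + 1) - 1) = ((j : Nat) == n - 1) := by
        by_cases hje : j = n - 1
        · have h3 : j + 1 = (n + 1) - 1 := by omega
          simp only [hje, h3]
          simp
          omega
        · have h3 : ¬ (j + 1 = (n + 1) - 1) := by omega
          have h4 : ¬ (j + 1 = n) := by omega
          simp [hje, h4]
      rw [hiff]
      by_cases hje : ((j : Nat) == n - 1)
      · rw [if_pos hje, if_pos hje]
        rw [pswap_cons]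
        exact ih n (j + 1) (pswap l i j) a i (by omega) (by omega)
      · rw [if_neg hje, if_neg hje]
        exact ih n (j + 1) l a i (by omega) (by omega)
    · have hj1 : j + 1 - 1 = (j - 1) + 1 := by omega
      simp only [List.getD_cons_succ, hdot, hj1, pswap_cons]
      simp

theorem mrStep_length (n : Nat) (l : List String) (i : Nat) :
    (mrStep n l i).length = l.length := by
  unfold mrStep
  split
  · exact innerLoop_length l i n (i + 1)
  · rfl

theorem foldl_mrStep_length (idxs : List Nat) : ∀ (l : List String) (n : Nat),
    (idxs.foldl (mrStep n) l).length = l.length := by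
  induction idxs with
  | nil => intro l n; rfl
  | cons i idxs ih =>
    intro l n
    rw [List.foldl_cons, ih, mrStep_length]

theorem mrStep_shift (a : String) (l : List String) (i n : Nat) :
    mrStep (n + 1) (a :: l) (i + 1) = a :: mrStep n l i := by
  unfold mrStep
  rw [List.getD_cons_succ]
  by_cases h : (l.getD i "" == "O")
  · rw [if_pos h, if_pos h]
    exact innerLoop_shift (n - (i + 1)) n (i + 1) l a i (by omega) rfl
  · rw [if_neg h, if_neg h]

theorem foldl_mrStep_shift (idxs : List Nat) : ∀ (l : List String) (a : String) (n : Nat),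
    (idxs.map (· + 1)).foldl (mrStep (n + 1)) (a :: l) = a :: idxs.foldl (mrStep n) l := by
  induction idxs with
  | nil => intro l a n; rfl
  | cons i idxs ih =>
    intro l a n
    rw [List.map_cons, List.foldl_cons, List.foldl_cons, mrStep_shift, ih]

theorem range_rev_succ (m : Nat) :
    (List.range (m + 1)).reverse = ((List.range m).reverse).map (· + 1) ++ [0] := by
  rw [List.range_succ_eq_map]
  simp [List.map_reverse]

theorem moveRock_eq_foldl (l : List String) :
    moveRock l = ((List.range l.length).reverse).foldl (mrStep l.length) l := rfl

theorem moveRock_length (l : List String) : (moveRock l).length = l.length := by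
  rw [moveRock_eq_foldl, foldl_mrStep_length]

theorem moveRock_cons (a : String) (t : List String) :
    moveRock (a :: t) = bub (a :: moveRock t) := by
  rw [moveRock_eq_foldl]
  have hlen : (a :: t).length = t.length + 1 := rfl
  rw [hlen, range_rev_succ, List.foldl_append, foldl_mrStep_shift]
  rw [← moveRock_eq_foldl]
  have hM : (moveRock t).length = t.length := moveRock_length t
  rw [List.foldl_cons, List.foldl_nil]
  unfold mrStep
  rw [List.getD_cons_zero]
  by_cases h : (a == "O")
  · rw [if_pos h]
    have ha : a = "O" := eq_of_beq h
    subst ha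
    rw [← hM]
    exact innerLoop_bub (moveRock t)
  · rw [if_neg h]
    simp [bub, h]

theorem moveRock_eq_settle (l : List String) : moveRock l = settle l := by
  induction l with
  | nil => rfl
  | cons a t ih => rw [moveRock_cons, ih]; rfl

theorem W_append (p q : List String) :
    W (p ++ q) = W p + W q + (p.length : Int) * (q.count "O" : Int) := by
  induction p with
  | nil => simp [W]
  | cons a p ih =>
    simp only [List.cons_append, W, ih, List.count_append, List.length_cons]
    push_cast
    ring

theorem bub_O (acc : List String) :
    bub ("O" :: acc) = List.replicate (dcount acc) "." ++ "O" :: acc.drop (dcount acc) := by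
  simp [bub]

theorem count_take_dcount (acc : List String) : ((acc.take (dcount acc)).count "O") = 0 := by
  rw [dcount_take, List.count_replicate]
  simp

theorem count_split (acc : List String) :
    (acc.count "O") = ((acc.drop (dcount acc)).count "O") := by
  conv_lhs => rw [← List.take_append_drop (dcount acc) acc]
  rw [List.count_append, count_take_dcount]
  omega

theorem count_bub_O (acc : List String) :
    ((bub ("O" :: acc)).count "O") = acc.count "O" + 1 := by
  rw [bub_O, List.count_append, List.count_replicate]
  rw [List.count_cons]
  simp only [BEq.rfl, if_true]
  rw [← count_split]
  simp

theorem W_bub_O (acc : List String) :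
    W (bub ("O" :: acc)) = W acc + (acc.count "O" : Int) + (dcount acc : Int) + 1 := by
  rw [bub_O, W_append]
  have h1 : W (List.replicate (dcount acc) ".") = 0 := by
    induction (dcount acc) with
    | zero => rfl
    | succ e ih => rw [List.replicate_succ, W, ih, List.count_replicate]; simp
  rw [h1, W]
  have h2 : W acc = W (acc.take (dcount acc)) + W (acc.drop (dcount acc))
      + ((acc.take (dcount acc)).length : Int) * ((acc.drop (dcount acc)).count "O" : Int) := by
    conv_lhs => rw [← List.take_append_drop (dcount acc) acc]
    rw [W_append]
  have h3 : W (acc.take (dcount acc)) = 0 := by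
    rw [dcount_take]
    induction (dcount acc) with
    | zero => rfl
    | succ e ih => rw [List.replicate_succ, W, ih, List.count_replicate]; simp
  have h4 : (acc.take (dcount acc)).length = dcount acc := by
    rw [dcount_take, List.length_replicate]
  rw [h3, h4, ← count_split] at h2
  rw [← count_split]
  simp only [List.length_replicate, BEq.rfl, if_true]
  rw [h2, List.count_cons]
  simp only [BEq.rfl, if_true]
  rw [← count_split]
  push_cast
  ring

theorem dcount_rep_append (e : Nat) (r : List String) :
    dcount (List.replicate e "." ++ "O" :: r) = e := by
  induction e with
  | zero =>
    rw [List.replicate_zero, List.nil_append, dcount_cons]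
    simp
  | succ e ih =>
    rw [List.replicate_succ, List.cons_append, dcount_cons, ih]
    simp

theorem dcount_bub_O (acc : List String) : dcount (bub ("O" :: acc)) = dcount acc := by
  rw [bub_O, dcount_rep_append]

theorem length_bub (a : String) (acc : List String) :
    (bub (a :: acc)).length = acc.length + 1 := by
  by_cases h : a == "O"
  · simp only [bub, h, if_true]
    simp
    have := dcount_le acc
    omega
  · simp [bub, h]

theorem W_cons (a : String) (t : List String) :
    W (a :: t) = (if a == "O" then (1 : Int) else 0) + W t + (t.count "O" : Int) := rfl

theorem coreB (h : Nat) : ∀ (rest acc : List String) (t : Int),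
    h = acc.length + rest.length →
    bcol h rest acc.length ((acc.length : Int) - (dcount acc : Int), t)
      = (((h : Int) - (dcount (rest.foldl (fun ac a => bub (a :: ac)) acc) : Int)),
         t + W (rest.foldl (fun ac a => bub (a :: ac)) acc) - W acc
           - (rest.length : Int) * (acc.count "O" : Int)) := by
  intro rest
  induction rest with
  | nil =>
    intro acc t hh
    simp only [List.length_nil] at hh
    simp only [List.foldl_nil, List.length_nil, bcol, Prod.mk.injEq]
    constructor
    · have he : h = acc.length := by omega
      rw [he]
    · push_cast
      ring
  | cons a r ih =>
    intro acc t hh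
    simp only [List.length_cons] at hh
    have hfold : ((a :: r).foldl (fun ac a => bub (a :: ac)) acc)
        = r.foldl (fun ac a => bub (a :: ac)) (bub (a :: acc)) := rfl
    rw [hfold]
    have hlen' : (bub (a :: acc)).length = acc.length + 1 := length_bub a acc
    have hhi : (h : Int) = (acc.length : Int) + (r.length : Int) + 1 := by
      push_cast
      omega
    simp only [List.length_cons]
    by_cases hO : (a == "O")
    · have ha : a = "O" := eq_of_beq hO
      subst ha
      simp only [bcol, BEq.rfl, if_true]
      have eq1 : ((acc.length : Int) - (dcount acc : Int) + 1)
          = ((bub ("O" :: acc)).length : Int) - (dcount (bub ("O" :: acc)) : Int) := by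
        rw [hlen', dcount_bub_O]; push_cast; ring
      rw [eq1]
      rw [show acc.length + 1 = (bub ("O" :: acc)).length from hlen'.symm]
      rw [ih (bub ("O" :: acc)) _ (by rw [hlen']; omega)]
      simp only [Prod.mk.injEq]
      refine ⟨by trivial, ?_⟩
      rw [W_bub_O, count_bub_O]
      push_cast
      linear_combination hhi
    · by_cases hdot : (a == ".")
      · have ha : a = "." := eq_of_beq hdot
        subst ha
        have hbub : bub ("." :: acc) = "." :: acc := by simp [bub]
        simp only [bcol]
        rw [if_neg (by decide), if_pos (by decide)]
        have eq1 : ((acc.length : Int) - (dcount acc : Int))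
            = ((bub ("." :: acc)).length : Int) - (dcount (bub ("." :: acc)) : Int) := by
          rw [hbub, dcount_cons]
          simp only [if_pos (by decide : (("." : String) == ".") = true), List.length_cons]
          push_cast
          ring
        rw [eq1]
        rw [show acc.length + 1 = (bub ("." :: acc)).length from hlen'.symm]
        rw [ih (bub ("." :: acc)) t (by rw [hlen']; omega)]
        simp only [Prod.mk.injEq]
        refine ⟨by trivial, ?_⟩
        rw [hbub, W_cons, List.count_cons]
        simp only [if_neg (by decide : ¬((("." : String) == "O") = true))]
        push_cast
        ring
      · -- blocker
        have hbub : bub (a :: acc) = a :: acc := by simp [bub, hO]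
        simp only [bcol]
        rw [if_neg hO, if_neg hdot]
        have eq1 : ((acc.length : Int) + 1)
            = ((bub (a :: acc)).length : Int) - (dcount (bub (a :: acc)) : Int) := by
          rw [hbub, dcount_cons]
          simp only [if_neg hdot, List.length_cons]
          push_cast
          ring
        rw [eq1]
        rw [show acc.length + 1 = (bub (a :: acc)).length from hlen'.symm]
        rw [ih (bub (a :: acc)) t (by rw [hlen']; omega)]
        simp only [Prod.mk.injEq]
        refine ⟨by trivial, ?_⟩
        rw [hbub, W_cons, List.count_cons]
        simp only [if_neg hO]
        push_cast
        ring

theorem settle_eq_foldr (l : List String) :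
    settle l = l.foldr (fun a ac => bub (a :: ac)) [] := by
  induction l with
  | nil => rfl
  | cons a t ih => simp only [settle, List.foldr_cons, ih]

theorem settle_reverse (c : List String) : settle (c.reverse) = settleF c := by
  rw [settle_eq_foldr, List.foldr_reverse]
  rfl

theorem getD_set_self (d : List (List String)) (j : Nat) (r : List String) (hj : j < d.length) :
    (d.set j r).getD j [] = r := by
  rw [List.getD_eq_getElem?_getD, List.getElem?_set_self hj]
  rfl

theorem getD_set_ne (d : List (List String)) (j y : Nat) (r : List String) (hne : y ≠ j) :
    (d.set j r).getD y [] = d.getD y [] := by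
  rw [List.getD_eq_getElem?_getD, List.getElem?_set_ne (by omega), ← List.getD_eq_getElem?_getD]

theorem getDs_set_self (row : List String) (x : Nat) (v : String) (hx : x < row.length) :
    (row.set x v).getD x "" = v := by
  rw [List.getD_eq_getElem?_getD, List.getElem?_set_self hx]
  rfl

theorem getDs_set_ne (row : List String) (x k : Nat) (v : String) (hne : k ≠ x) :
    (row.set x v).getD k "" = row.getD k "" := by
  rw [List.getD_eq_getElem?_getD, List.getElem?_set_ne (by omega), ← List.getD_eq_getElem?_getD]

theorem wb_length (x : Nat) : ∀ (mv : List String) (d : List (List String)) (j : Nat),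
    ((mv.foldl (fun st el => (st.1.set st.2 ((st.1.getD st.2 []).set x el), st.2 - 1)) (d, j)).1).length
      = d.length := by
  intro mv
  induction mv with
  | nil => intro d j; rfl
  | cons e mv ih =>
    intro d j
    rw [List.foldl_cons, ih]
    simp

theorem wb_rows (x : Nat) : ∀ (mv : List String) (d : List (List String)) (j : Nat),
    mv.length ≤ j + 1 → j < d.length → ∀ y,
    ((mv.foldl (fun st el => (st.1.set st.2 ((st.1.getD st.2 []).set x el), st.2 - 1)) (d, j)).1).getD y []
      = if j + 1 - mv.length ≤ y ∧ y ≤ j then (d.getD y []).set x (mv.getD (j - y) "")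
        else d.getD y [] := by
  intro mv
  induction mv with
  | nil =>
    intro d j _ _ y
    rw [if_neg (by simp only [List.length_nil]; omega)]
    rfl
  | cons e mv ih =>
    intro d j hlen hj y
    simp only [List.length_cons] at hlen
    rw [List.foldl_cons]
    rw [ih (d.set j ((d.getD j []).set x e)) (j - 1) (by omega) (by simp only [List.length_set]; omega)]
    by_cases hyj : y = j
    · subst hyj
      by_cases hmv : mv.length = 0
      · have hnil : mv = [] := List.eq_nil_of_length_eq_zero hmv
        subst hnil
        rw [if_neg (by simp only [List.length_nil]; omega)]
        rw [if_pos (by simp only [List.length_cons, List.length_nil]; omega)]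
        rw [getD_set_self _ _ _ hj]
        simp
      · rw [if_neg (by omega)]
        rw [if_pos (by simp only [List.length_cons]; omega)]
        rw [getD_set_self _ _ _ hj]
        simp
    · rw [getD_set_ne _ _ _ _ hyj]
      by_cases hc : j + 1 - (mv.length + 1) ≤ y ∧ y ≤ j
      · have hyj' : y < j := by omega
        rw [if_pos (by omega), if_pos (by simp only [List.length_cons]; omega)]
        have he : j - y = (j - 1 - y) + 1 := by omega
        rw [he, List.getD_cons_succ]
      · rw [if_neg (by omega), if_neg (by simp only [List.length_cons]; omega)]

-- A's in-place update of column x (the body of A's outer loop)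
def updA (h x : Nat) (d : List (List String)) : List (List String) :=
  ((moveRock (((List.range h).map (fun y => (d.getD y []).getD x "")).reverse)).foldl
     (fun st el => (st.1.set st.2 ((st.1.getD st.2 []).set x el), st.2 - 1)) (d, h - 1)).1

theorem Sfrom_length : ∀ (rest acc : List String),
    (rest.foldl (fun ac a => bub (a :: ac)) acc).length = acc.length + rest.length := by
  intro rest
  induction rest with
  | nil => intro acc; simp
  | cons a r ih =>
    intro acc
    rw [List.foldl_cons, ih, length_bub]
    simp
    omega

theorem settleF_length (c : List String) : (settleF c).length = c.length := by
  have := Sfrom_length c []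
  simpa [settleF] using this

theorem colN_length (d : List (List String)) (h x : Nat) : (colN d h x).length = h := by
  simp [colN]

theorem moved_settleF (d : List (List String)) (h x : Nat) :
    moveRock (((List.range h).map (fun y => (d.getD y []).getD x "")).reverse)
      = settleF (colN d h x) := by
  rw [moveRock_eq_settle, settle_reverse]
  rfl

theorem updA_rows (d : List (List String)) (h x : Nat) (hh : d.length = h) (h1 : 1 ≤ h) :
    ∀ y, (updA h x d).getD y []
      = if y < h then (d.getD y []).set x ((settleF (colN d h x)).getD (h - 1 - y) "")
        else d.getD y [] := by
  intro y
  unfold updA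
  rw [moved_settleF]
  rw [wb_rows x _ d (h - 1) (by rw [settleF_length, colN_length]; omega) (by omega) y]
  have hml : (settleF (colN d h x)).length = h := by rw [settleF_length, colN_length]
  rw [hml]
  by_cases hy : y < h
  · rw [if_pos (by omega), if_pos hy]
  · rw [if_neg (by omega), if_neg hy]

theorem updA_length (d : List (List String)) (h x : Nat) :
    (updA h x d).length = d.length := by
  unfold updA
  rw [wb_length]

theorem fold_updA (data : List (List String)) (w : Nat)
    (h1 : 1 ≤ data.length) (hw : ∀ row ∈ data, w ≤ row.length) :
    ∀ m, m ≤ w →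
    (((List.range m).foldl (fun d x => updA data.length x d) data).length = data.length)
    ∧ (∀ y, (((List.range m).foldl (fun d x => updA data.length x d) data).getD y []).length
          = (data.getD y []).length)
    ∧ (∀ y x', m ≤ x' →
        ((((List.range m).foldl (fun d x => updA data.length x d) data).getD y []).getD x' ""
          = (data.getD y []).getD x' ""))
    ∧ (∀ y, y < data.length → ∀ x', x' < m →
        ((((List.range m).foldl (fun d x => updA data.length x d) data).getD y []).getD x' ""
          = (settleF (colN data data.length x')).getD (data.length - 1 - y) "")) := by
  intro m
  induction m with
  | zero =>
    intro _
    refine ⟨rfl, fun y => rfl, fun y x' _ => rfl, fun y _ x' hx' => absurd hx' (by omega)⟩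
  | succ m ih =>
    intro hm
    obtain ⟨ih1, ih2, ih3, ih4⟩ := ih (by omega)
    set dm := (List.range m).foldl (fun d x => updA data.length x d) data with hdm
    have hfold : (List.range (m + 1)).foldl (fun d x => updA data.length x d) data
        = updA data.length m dm := by
      rw [List.range_succ, List.foldl_append, List.foldl_cons, List.foldl_nil]
    have hcol : colN dm data.length m = colN data data.length m := by
      unfold colN
      apply List.map_congr_left
      intro y _
      exact ih3 y m (by omega)
    have hrows := updA_rows dm data.length m ih1 h1
    rw [hcol] at hrows
    have hmem : ∀ y, y < data.length → data.getD y [] ∈ data := by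
      intro y hy
      rw [List.getD_eq_getElem _ _ hy]
      exact List.getElem_mem hy
    have hrl : ∀ y, y < data.length → m < (dm.getD y []).length := by
      intro y hy
      rw [ih2 y]
      have := hw _ (hmem y hy)
      omega
    refine ⟨?_, ?_, ?_, ?_⟩
    · rw [hfold, updA_length, ih1]
    · intro y
      rw [hfold, hrows y]
      by_cases hy : y < data.length
      · rw [if_pos hy, List.length_set, ih2]
      · rw [if_neg hy, ih2]
    · intro y x' hx'
      rw [hfold, hrows y]
      by_cases hy : y < data.length
      · rw [if_pos hy, getDs_set_ne _ _ _ _ (by omega), ih3 y x' (by omega)]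
      · rw [if_neg hy, ih3 y x' (by omega)]
    · intro y hy x' hx'
      rw [hfold, hrows y, if_pos hy]
      by_cases hxm : x' = m
      · subst hxm
        rw [getDs_set_self _ _ _ (hrl y hy)]
      · rw [getDs_set_ne _ _ _ _ hxm]
        exact ih4 y hy x' (by omega)

theorem foldl_add_sum (g : Nat → Int) : ∀ (n : Nat) (t : Int),
    (List.range n).foldl (fun tot i => tot + g i) t = t + ∑ i ∈ Finset.range n, g i := by
  intro n
  induction n with
  | zero => intro t; simp
  | succ n ih =>
    intro t
    rw [List.range_succ, List.foldl_append, List.foldl_cons, List.foldl_nil, ih,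
        Finset.sum_range_succ]
    ring

theorem count_ind (r : List String) :
    ((r.count "O" : Nat) : Int)
      = ∑ k ∈ Finset.range r.length, (if r.getD k "" == "O" then (1 : Int) else 0) := by
  induction r with
  | nil => simp
  | cons a t ih =>
    rw [List.length_cons, Finset.sum_range_succ']
    simp only [List.getD_cons_succ, List.getD_cons_zero]
    rw [← ih, List.count_cons]
    by_cases h : (a == "O")
    · rw [if_pos h]
      simp [h]
    · rw [if_neg h]
      simp [h]

theorem W_ind (m : List String) :
    W m = ∑ k ∈ Finset.range m.length, (if m.getD k "" == "O" then ((k : Int) + 1) else 0) := by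
  induction m with
  | nil => simp [W]
  | cons a t ih =>
    rw [W_cons, List.length_cons, Finset.sum_range_succ']
    simp only [List.getD_cons_succ, List.getD_cons_zero]
    have hsplit : ∀ k : Nat, (if t.getD k "" == "O" then ((k : Int) + 1) + 1 else 0)
        = (if t.getD k "" == "O" then ((k : Int) + 1) else 0)
          + (if t.getD k "" == "O" then (1 : Int) else 0) := by
      intro k; split <;> ring
    have : ∑ k ∈ Finset.range t.length, (if t.getD k "" == "O" then (((k : Nat) : Int) + 1) + 1 else 0)
        = W t + ((t.count "O" : Nat) : Int) := by
      rw [Finset.sum_congr rfl (fun k _ => hsplit k), Finset.sum_add_distrib, ← ih, ← count_ind]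
    push_cast at this ⊢
    rw [this]
    split <;> ring

theorem sum_range_add (f : Nat → Int) (m : Nat) : ∀ (n : Nat),
    ∑ i ∈ Finset.range (m + n), f i
      = ∑ i ∈ Finset.range m, f i + ∑ i ∈ Finset.range n, f (m + i) := by
  intro n
  induction n with
  | zero => simp
  | succ n ih =>
    have : m + (n + 1) = (m + n) + 1 := by omega
    rw [this, Finset.sum_range_succ, ih, Finset.sum_range_succ]
    ring

theorem drop_getD (r : List String) (w k : Nat) : (r.drop w).getD k "" = r.getD (w + k) "" := by
  rw [List.getD_eq_getElem?_getD, List.getElem?_drop, ← List.getD_eq_getElem?_getD]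

theorem col_load (mv : List String) (h : Nat) (hlen : mv.length = h) :
    ∑ i ∈ Finset.range h, (if mv.getD (h - 1 - i) "" == "O" then (1 : Int) else 0)
        * ((h : Int) - (i : Int))
      = W mv := by
  have hrefl := Finset.sum_range_reflect
    (fun j => (if mv.getD j "" == "O" then ((j : Int) + 1) else 0)) h
  rw [W_ind, hlen]
  rw [← hrefl]
  apply Finset.sum_congr rfl
  intro i hi
  have hi' : i < h := Finset.mem_range.mp hi
  have hcast : ((h - 1 - i : Nat) : Int) + 1 = (h : Int) - (i : Int) := by omega
  split
  · rw [hcast]; ring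
  · ring

theorem bcol_bridge (hh : Nat) (f : Nat → String) : ∀ (m k : Nat) (st : Int × Int),
    (List.range' k m).foldl (fun st y =>
        if f y == "O" then (st.1 + 1, st.2 + ((hh : Int) - st.1))
        else if f y == "." then st else ((y : Int) + 1, st.2)) st
      = bcol hh ((List.range' k m).map f) k st := by
  intro m
  induction m with
  | zero => intro k st; rfl
  | succ m ih =>
    intro k st
    rw [List.range'_succ, List.map_cons, List.foldl_cons]
    rw [ih (k + 1)]
    rfl

theorem part1_alt_unfold (data : List (List String)) :
    part1_alt data
      = (List.range (data.headD []).length).foldl (fun (total : Int) x =>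
          ((List.range data.length).foldl (fun (st : Int × Int) y =>
            let c := (data.getD y []).getD x ""
            if c == "O" then (st.1 + 1, st.2 + ((data.length : Int) - st.1))
            else if c == "." then st
            else ((y : Int) + 1, st.2)) ((0 : Int), total)).2) 0 := rfl

theorem part1_alt_eq (data : List (List String)) :
    part1_alt data
      = ∑ x ∈ Finset.range (data.headD []).length, W (settleF (colN data data.length x)) := by
  rw [part1_alt_unfold]
  have hcols : ∀ (t : Int) (x : Nat),
      ((List.range data.length).foldl (fun (st : Int × Int) y =>
          let c := (data.getD y []).getD x ""
          if c == "O" then (st.1 + 1, st.2 + ((data.length : Int) - st.1))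
          else if c == "." then st
          else ((y : Int) + 1, st.2)) ((0 : Int), t)).2
        = t + W (settleF (colN data data.length x)) := by
    intro t x
    have hb := bcol_bridge data.length (fun y => (data.getD y []).getD x "")
        data.length 0 ((0 : Int), t)
    rw [List.range_eq_range']
    rw [hb]
    have hmap : (List.range' 0 data.length).map (fun y => (data.getD y []).getD x "")
        = colN data data.length x := by
      rw [← List.range_eq_range']
      rfl
    rw [hmap]
    have hc := coreB data.length (colN data data.length x) [] t
      (by rw [colN_length]; simp)
    simp only [List.length_nil, show dcount ([] : List String) = 0 from rfl, Nat.cast_zero,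
      show W ([] : List String) = 0 from rfl, List.count_nil, sub_zero, mul_zero] at hc
    rw [hc]
    simp [settleF]
  have hfun : (fun (total : Int) x =>
      ((List.range data.length).foldl (fun (st : Int × Int) y =>
        let c := (data.getD y []).getD x ""
        if c == "O" then (st.1 + 1, st.2 + ((data.length : Int) - st.1))
        else if c == "." then st
        else ((y : Int) + 1, st.2)) ((0 : Int), total)).2)
      = (fun (total : Int) x => total + W (settleF (colN data data.length x))) := by
    funext t x
    exact hcols t x
  rw [hfun, foldl_add_sum]
  rw [zero_add]

theorem part1_unfold (data : List (List String)) :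
    part1 data
      = (List.range data.length).foldl (fun (tot : Int) i =>
          tot + ((((List.range (data.headD []).length).foldl
              (fun d x => updA data.length x d) data).getD i []).count "O")
            * ((data.length : Int) - (i : Int))) 0 := rfl

theorem part1_eq (data : List (List String)) (h1 : 1 ≤ data.length)
    (hw : ∀ row ∈ data, (data.headD []).length ≤ row.length) :
    part1 data
      = (∑ x ∈ Finset.range (data.headD []).length, W (settleF (colN data data.length x)))
        + ∑ y ∈ Finset.range data.length,
            (((data.getD y []).drop (data.headD []).length).count "O" : Int)
              * ((data.length : Int) - (y : Int)) := by
  obtain ⟨f1, f2, f3, f4⟩ := fold_updA data (data.headD []).length h1 hw (data.headD []).length le_rfl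
  rw [part1_unfold, foldl_add_sum]
  rw [zero_add]
  set h := data.length with hh
  set w := (data.headD []).length with hwdef
  set dw := (List.range w).foldl (fun d x => updA h x d) data with hdw
  have hmem : ∀ y, y < h → data.getD y [] ∈ data := by
    intro y hy
    rw [List.getD_eq_getElem _ _ hy]
    exact List.getElem_mem hy
  have hterm : ∀ i, i < h →
      (((dw.getD i []).count "O" : Nat) : Int) * ((h : Int) - (i : Int))
        = (∑ k ∈ Finset.range w,
            (if (settleF (colN data h k)).getD (h - 1 - i) "" == "O" then (1 : Int) else 0))
              * ((h : Int) - (i : Int))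
          + (((data.getD i []).drop w).count "O" : Int) * ((h : Int) - (i : Int)) := by
    intro i hi
    have hL : (dw.getD i []).length = (data.getD i []).length := f2 i
    have hwL : w ≤ (data.getD i []).length := hw _ (hmem i hi)
    have hsplitL : (dw.getD i []).length = w + ((data.getD i []).length - w) := by omega
    rw [count_ind (dw.getD i []), hsplitL, sum_range_add]
    have hA : ∑ k ∈ Finset.range w, (if (dw.getD i []).getD k "" == "O" then (1 : Int) else 0)
        = ∑ k ∈ Finset.range w,
            (if (settleF (colN data h k)).getD (h - 1 - i) "" == "O" then (1 : Int) else 0) := by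
      apply Finset.sum_congr rfl
      intro k hk
      rw [f4 i hi k (Finset.mem_range.mp hk)]
    have hB : ∑ k ∈ Finset.range ((data.getD i []).length - w),
          (if (dw.getD i []).getD (w + k) "" == "O" then (1 : Int) else 0)
        = (((data.getD i []).drop w).count "O" : Int) := by
      rw [count_ind ((data.getD i []).drop w), List.length_drop]
      apply Finset.sum_congr rfl
      intro k _
      rw [f3 i (w + k) (by omega), drop_getD]
    rw [hA, hB]
    ring
  rw [Finset.sum_congr rfl (fun i hi => hterm i (Finset.mem_range.mp hi))]
  rw [Finset.sum_add_distrib]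
  congr 1
  have hswap : ∑ i ∈ Finset.range h, (∑ k ∈ Finset.range w,
        (if (settleF (colN data h k)).getD (h - 1 - i) "" == "O" then (1 : Int) else 0))
          * ((h : Int) - (i : Int))
      = ∑ k ∈ Finset.range w, ∑ i ∈ Finset.range h,
          (if (settleF (colN data h k)).getD (h - 1 - i) "" == "O" then (1 : Int) else 0)
            * ((h : Int) - (i : Int)) := by
    rw [← Finset.sum_comm]
    apply Finset.sum_congr rfl
    intro i _
    rw [Finset.sum_mul]
  rw [hswap]
  apply Finset.sum_congr rfl
  intro k _
  exact col_load _ h (by rw [settleF_length, colN_length])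

-- the ragged-overhang contribution that A adds and B does not
theorem extra_eq_zero (data : List (List String)) (hnd : ¬ D_part1 data) :
    ∑ y ∈ Finset.range data.length,
        (((data.getD y []).drop (data.headD []).length).count "O" : Int)
          * ((data.length : Int) - (y : Int)) = 0 := by
  apply Finset.sum_eq_zero
  intro y hy
  have hy' : y < data.length := Finset.mem_range.mp hy
  have hmem : data.getD y [] ∈ data := by
    rw [List.getD_eq_getElem _ _ hy']
    exact List.getElem_mem hy'
  have hnot : "O" ∉ (data.getD y []).drop (data.headD []).length := by
    intro hO
    exact hnd ⟨data.getD y [], hmem, hO⟩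
  rw [List.count_eq_zero.mpr hnot]
  simp

theorem extra_pos (data : List (List String)) (hd : D_part1 data) :
    0 < ∑ y ∈ Finset.range data.length,
        (((data.getD y []).drop (data.headD []).length).count "O" : Int)
          * ((data.length : Int) - (y : Int)) := by
  obtain ⟨row, hmem, hO⟩ := hd
  obtain ⟨i, hi, hrow⟩ := List.mem_iff_getElem.mp hmem
  apply Finset.sum_pos'
  · intro y hy
    have hy' : y < data.length := Finset.mem_range.mp hy
    have h1 : (0 : Int) ≤ (((data.getD y []).drop (data.headD []).length).count "O" : Int) := by
      positivity
    have h2 : (0 : Int) ≤ (data.length : Int) - (y : Int) := by omega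
    exact mul_nonneg h1 h2
  · refine ⟨i, Finset.mem_range.mpr hi, ?_⟩
    have hgd : data.getD i [] = row := by
      rw [List.getD_eq_getElem _ _ hi, hrow]
    rw [hgd]
    have h1 : (0 : Int) < ((row.drop (data.headD []).length).count "O" : Int) := by
      have := List.count_pos_iff.mpr hO
      omega
    have h2 : (0 : Int) < (data.length : Int) - (i : Int) := by omega
    exact mul_pos h1 h2

-- ===== VERDICT (by name: the statements are the Claim_ definitions above) =====
theorem part1_spec : Claim_unchanged_part1 := by
  intro data _hdom hpre hnd
  obtain ⟨hne, hw⟩ := hpre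
  have h1 : 1 ≤ data.length := List.length_pos_of_ne_nil hne
  show part1 data = part1_alt data
  rw [part1_eq data h1 hw, part1_alt_eq, extra_eq_zero data hnd, add_zero]

theorem part1_changed : Claim_changed_part1 := by
  unfold Claim_changed_part1; decide

theorem part1_tight : Claim_exact_part1 := by
  intro data _hdom hpre hd
  obtain ⟨hne, hw⟩ := hpre
  have h1 : 1 ≤ data.length := List.length_pos_of_ne_nil hne
  rw [part1_eq data h1 hw, part1_alt_eq]
  have := extra_pos data hd
  omega
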